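-- pv_equiv track=rewrite | github.com/CFSAN-Biostatistics/vcftoolz | vcftools/vcftools.py | get_set_intersections
-- ===== SOURCE A (Python) =====
-- def get_set_intersections(sets):
--     """
--     Given a list of sets, return a new list of sets with all the possible
--     mutually exclusive overlapping combinations of those sets.  Another way
--     to think of this is the mutually exclusive sections of a venn diagram
--     of the sets.  If the original list has N sets, the returned list will
--     have (2**N)-1 sets.
--
--     Parameters
--     ----------
--     sets : list of set
--
--     Returns
--     -------
--     combinations : list of tuple
--         tag : str
--             Binary string representing which sets are included / excluded in
--             the combination.
--         set : set
--             The set formed by the overlapping input sets.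
--     """
--     num_combinations = 2 ** len(sets)
--     bit_flags = [2 ** n for n in range(len(sets))]
--     flags_zip_sets = [z for z in zip(bit_flags, sets)]
--
--     combo_sets = []
--     for bits in range(num_combinations - 1, 0, -1):
--         include_sets = [s for flag, s in flags_zip_sets if bits & flag]
--         exclude_sets = [s for flag, s in flags_zip_sets if not bits & flag]
--         combo = set.intersection(*include_sets)
--         combo = set.difference(combo, *exclude_sets)
--         tag = ''.join([str(int((bits & flag) > 0)) for flag in bit_flags])
--         combo_sets.append((tag, combo))
--     return combo_sets
-- ===== SOURCE B (Python) =====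
-- def get_set_intersections(sets):
--     n = len(sets)
--     # classify every element by the bitmask of the sets it belongs to
--     masks = {}
--     for i, s in enumerate(sets):
--         bit = 2 ** i
--         for x in s:
--             masks[x] = masks.get(x, 0) | bit
--     # group elements by their membership bitmask
--     groups = {}
--     for x, m in masks.items():
--         groups.setdefault(m, []).append(x)
--     combos = []
--     for bits in range(2 ** n - 1, 0, -1):
--         tag = ''.join('1' if (bits >> i) & 1 else '0' for i in range(n))
--         combos.append((tag, set(groups.get(bits, []))))
--     return combos
-- ===== Notes on version B (the rewrite author's own statement) =====
-- stated objective: faster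
-- what changed: Instead of intersecting/differencing all N sets for each of the 2^N-1 regions, B classifies each element once by its set-membership bitmask into a dict, groups elements by mask, and emits each region by a single dict lookup.
import Mathlib
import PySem

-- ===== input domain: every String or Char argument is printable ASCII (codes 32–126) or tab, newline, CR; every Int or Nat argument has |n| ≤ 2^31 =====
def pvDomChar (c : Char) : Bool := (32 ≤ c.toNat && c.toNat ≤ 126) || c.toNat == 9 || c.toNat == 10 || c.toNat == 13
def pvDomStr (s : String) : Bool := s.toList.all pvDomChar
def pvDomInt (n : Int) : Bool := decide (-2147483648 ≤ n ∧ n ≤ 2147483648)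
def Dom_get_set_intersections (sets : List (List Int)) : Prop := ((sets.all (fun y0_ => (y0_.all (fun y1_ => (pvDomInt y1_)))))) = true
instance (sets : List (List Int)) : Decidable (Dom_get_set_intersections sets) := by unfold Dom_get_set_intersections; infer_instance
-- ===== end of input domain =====

-- B replaces the per-region chain of N-set intersections/differences by a single bitmask
-- classification of the elements into a dict, grouped by mask (objective: faster).
-- The Python inputs are sets: each input list is read as the set of its distinct elements.

-- ===== PORT A =====
def get_set_intersections (sets : List (List Int)) : List (String × List Int) :=
  let numCombinations : Int := 2 ^ sets.length
  let bitFlags : List Int := (PySem.List.pyRange 0 (PySem.List.len sets)).map (fun k => (2:Int) ^ k.toNat)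
  let flagsZipSets : List (Int × PySem.Set Int) := List.zip bitFlags (sets.map (fun s => PySem.Set.ofList s))
  (PySem.List.pyRange (numCombinations - 1) 0 (-1)).foldl (fun comboSets bits =>
    let includeSets := (flagsZipSets.filter (fun p => PySem.Int.band bits p.1 != 0)).map (fun p => p.2)
    let excludeSets := (flagsZipSets.filter (fun p => !(PySem.Int.band bits p.1 != 0))).map (fun p => p.2)
    -- set.intersection(*include_sets): the first set intersected with the rest
    -- (Python would raise on an empty argument list; unreachable here since bits > 0,
    --  so the [] default of headD is only a totalization guard)
    let combo : PySem.Set Int := includeSets.tail.foldl PySem.Set.inter (includeSets.headD [])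
    let combo2 := excludeSets.foldl PySem.Set.diff combo
    let tag := PySem.Str.join "" (bitFlags.map (fun flag => PySem.Int.toStr (if 0 < PySem.Int.band bits flag then 1 else 0)))
    comboSets ++ [(tag, combo2)]) []

-- ===== PORT B =====
def get_set_intersections_alt (sets : List (List Int)) : List (String × List Int) :=
  let n := sets.length
  let masks : PySem.Dict Int Int :=
    (sets.zipIdx).foldl (fun d p =>
      (PySem.Set.ofList p.1).foldl (fun d x => d.insert x (PySem.Int.bor (d.getD x 0) ((2:Int) ^ p.2))) d)
      PySem.Dict.empty
  let groups : PySem.Dict Int (List Int) :=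
    masks.items.foldl (fun d q => d.modify q.2 [] (fun l => l ++ [q.1])) PySem.Dict.empty
  (PySem.List.pyRange ((2:Int) ^ n - 1) 0 (-1)).foldl (fun combos bits =>
    let tag := PySem.Str.join "" ((PySem.List.pyRange 0 (n:Int)).map
      (fun i => if PySem.Int.band (bits >>> i) 1 != 0 then "1" else "0"))
    combos ++ [(tag, PySem.Set.ofList (groups.getD bits []))]) []

-- ===== PRECONDITION & SPEC =====
def Spec_get_set_intersections (sets : List (List Int)) (out : List (String × List Int)) : Prop := out = get_set_intersections_alt sets
instance (sets : List (List Int)) (out : List (String × List Int)) : Decidable (Spec_get_set_intersections sets out) := by unfold Spec_get_set_intersections; infer_instance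

-- ===== CLAIM (what is proved, stated in full; the proofs are below) =====
def Claim_equal_get_set_intersections : Prop := ∀ (sets : List (List Int)), Dom_get_set_intersections sets → Spec_get_set_intersections sets (get_set_intersections sets)

-- ===== LEMMAS AND PROOFS =====

-- membership bitmask of y over the lists `ls`, whose first list carries bit index `i`
def pvMaskN : List (List Int) → Nat → Int → Nat
  | [], _, _ => 0
  | a :: ls, i, y => (if y ∈ a then 1 <<< i else 0) ||| pvMaskN ls (i+1) y

theorem testBit_pvMaskN (ls : List (List Int)) (i : Nat) (y : Int) (k : Nat) :
    (pvMaskN ls i y).testBit k = decide (i ≤ k ∧ k - i < ls.length ∧ y ∈ ls.getD (k - i) []) := by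
  induction ls generalizing i with
  | nil => simp [pvMaskN, Nat.zero_testBit]
  | cons a ls ih =>
    simp only [pvMaskN, Nat.testBit_or, ih (i+1)]
    by_cases hm : y ∈ a
    · simp only [if_pos hm, Nat.one_shiftLeft, Nat.testBit_two_pow]
      rw [Bool.eq_iff_iff]
      simp only [Bool.or_eq_true, decide_eq_true_eq]
      constructor
      · rintro (rfl | ⟨h1, h2, h3⟩)
        · exact ⟨le_refl _, by simp, by simpa using hm⟩
        · refine ⟨by omega, by simp only [List.length_cons]; omega, ?_⟩
          have hk : k - i = (k - (i+1)) + 1 := by omega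
          rw [hk]; simpa using h3
      · rintro ⟨h1, h2, h3⟩
        rcases Nat.eq_or_lt_of_le h1 with heq | hlt
        · exact Or.inl heq
        · refine Or.inr ⟨hlt, ?_, ?_⟩
          · simp only [List.length_cons] at h2; omega
          · have hk : k - i = (k - (i+1)) + 1 := by omega
            rw [hk] at h3; simpa using h3
    · simp only [if_neg hm, Nat.zero_testBit, Bool.false_or]
      rw [Bool.eq_iff_iff]
      simp only [decide_eq_true_eq]
      constructor
      · rintro ⟨h1, h2, h3⟩
        refine ⟨by omega, by simp only [List.length_cons]; omega, ?_⟩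
        have hk : k - i = (k - (i+1)) + 1 := by omega
        rw [hk]; simpa using h3
      · rintro ⟨h1, h2, h3⟩
        have hne : i ≠ k := by
          rintro rfl
          simp only [Nat.sub_self, List.getD_cons_zero] at h3
          exact hm h3
        refine ⟨by omega, ?_, ?_⟩
        · simp only [List.length_cons] at h2; omega
        · have hk : k - i = (k - (i+1)) + 1 := by omega
          rw [hk] at h3; simpa using h3

theorem pvMaskN_eq_iff (sets : List (List Int)) (b : Nat) (y : Int) (hb : b < 2 ^ sets.length) :
    pvMaskN sets 0 y = b ↔ ∀ i, i < sets.length → (y ∈ sets.getD i [] ↔ b.testBit i) := by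
  constructor
  · rintro rfl i hi
    rw [testBit_pvMaskN]
    simp [hi]
  · intro h
    apply Nat.eq_of_testBit_eq
    intro i
    rw [testBit_pvMaskN]
    by_cases hi : i < sets.length
    · simp only [Nat.zero_le, true_and, Nat.sub_zero, hi, true_and]
      rw [Bool.eq_iff_iff]
      simp only [decide_eq_true_eq]
      exact h i hi
    · have h1 : b.testBit i = false :=
        Nat.testBit_eq_false_of_lt (lt_of_lt_of_le hb (Nat.pow_le_pow_right (by norm_num) (by omega)))
      simp [h1, hi]

theorem update_nodup (l : List Int) (hl : l.Nodup) (s : PySem.Set Int) :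
    PySem.Set.update s l = s ++ l.filter (fun x => !(decide (x ∈ s))) := by
  induction l generalizing s with
  | nil => simp [PySem.Set.update]
  | cons x l ih =>
    rcases List.nodup_cons.mp hl with ⟨hx, hl'⟩
    have hstep : PySem.Set.update s (x :: l) = PySem.Set.update (PySem.Set.add s x) l := by
      simp [PySem.Set.update]
    rw [hstep]
    by_cases hxs : x ∈ s
    · have : PySem.Set.add s x = s := by simp [PySem.Set.add, hxs]
      rw [this, ih hl']
      simp [hxs]
    · have : PySem.Set.add s x = s ++ [x] := by simp [PySem.Set.add, hxs]
      rw [this, ih hl']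
      have hf : l.filter (fun z => !(decide (z ∈ s ++ [x]))) = l.filter (fun z => !(decide (z ∈ s))) := by
        apply List.filter_congr
        intro z hz
        have : z ≠ x := fun h => hx (h ▸ hz)
        simp [List.mem_append, this]
      rw [hf]
      simp [hxs, List.append_assoc]

theorem mem_update (s : PySem.Set Int) (l : List Int) (y : Int) :
    y ∈ PySem.Set.update s l ↔ y ∈ s ∨ y ∈ l := by
  have h := PySem.Set.mem_foldl_add (f := fun (b : Int) => b) (l := l) (s := s) (y := y)
  simp only [PySem.Set.update]
  constructor
  · intro hy
    rcases h.mp hy with h1 | ⟨b, hb, rfl⟩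
    · exact Or.inl h1
    · exact Or.inr hb
  · rintro (h1 | h1)
    · exact h.mpr (Or.inl h1)
    · exact h.mpr (Or.inr ⟨y, h1, rfl⟩)

theorem ofList_nodup_id (l : List Int) (hl : l.Nodup) : PySem.Set.ofList l = l := by
  rw [← PySem.Set.update_nil_left, update_nodup l hl []]
  simp

theorem getD_inner_fold (l : List Int) (hl : l.Nodup) (d : PySem.Dict Int Int) (b y : Int) :
    ((l.foldl (fun d x => d.insert x (PySem.Int.bor (d.getD x 0) b)) d)).getD y 0
      = if y ∈ l then PySem.Int.bor (d.getD y 0) b else d.getD y 0 := by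
  induction l generalizing d with
  | nil => simp
  | cons x l ih =>
    rcases List.nodup_cons.mp hl with ⟨hx, hl'⟩
    simp only [List.foldl_cons, ih hl']
    by_cases hy : y ∈ l
    · have hne : y ≠ x := fun h => hx (h ▸ hy)
      simp [hy, PySem.Dict.getD_insert, hne, List.mem_cons]
    · by_cases hyx : y = x
      · subst hyx
        simp [hy]
      · simp [hy, PySem.Dict.getD_insert, hyx, List.mem_cons]

theorem or_shuffle (a b c : Nat) : a ||| (b ||| c) = (c ||| a) ||| b := by
  apply Nat.eq_of_testBit_eq
  intro i
  simp [Nat.testBit_or, Bool.or_comm, Bool.or_left_comm]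

theorem getD_masks_gen (y : Int) (ls : List (List Int)) (k : Nat) (d : PySem.Dict Int Int) (m : Nat)
    (hd : d.getD y 0 = (m : Int)) :
    ((ls.zipIdx k).foldl (fun d p =>
      (PySem.Set.ofList p.1).foldl (fun d x => d.insert x (PySem.Int.bor (d.getD x 0) ((2:Int) ^ p.2))) d)
      d).getD y 0 = (((pvMaskN ls k y) ||| m : Nat) : Int) := by
  induction ls generalizing k d m with
  | nil => simp [pvMaskN, hd]
  | cons a ls ih =>
    simp only [List.zipIdx_cons, List.foldl_cons]
    have hcast : ((2:Int) ^ k) = ((1 <<< k : Nat) : Int) := by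
      rw [Nat.one_shiftLeft]; push_cast; ring
    by_cases hy : y ∈ a
    · have h1 : ((PySem.Set.ofList a).foldl
          (fun d x => d.insert x (PySem.Int.bor (d.getD x 0) ((2:Int) ^ k))) d).getD y 0
          = ((m ||| 1 <<< k : Nat) : Int) := by
        rw [getD_inner_fold _ (PySem.Set.nodup_ofList a) d _ y,
          if_pos ((PySem.Set.mem_ofList a y).mpr hy), hd, hcast, PySem.Int.bor_natCast]
      rw [ih (k+1) _ _ h1]
      simp only [pvMaskN, if_pos hy]
      congr 1
      exact or_shuffle _ _ _
    · have h1 : ((PySem.Set.ofList a).foldl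
          (fun d x => d.insert x (PySem.Int.bor (d.getD x 0) ((2:Int) ^ k))) d).getD y 0
          = ((m : Nat) : Int) := by
        rw [getD_inner_fold _ (PySem.Set.nodup_ofList a) d _ y,
          if_neg (fun h => hy ((PySem.Set.mem_ofList a y).mp h)), hd]
      rw [ih (k+1) _ _ h1]
      simp only [pvMaskN, if_neg hy, Nat.zero_or]

theorem keys_masks_gen (ls : List (List Int)) (k : Nat) (d : PySem.Dict Int Int) :
    ((ls.zipIdx k).foldl (fun d p =>
      (PySem.Set.ofList p.1).foldl (fun d x => d.insert x (PySem.Int.bor (d.getD x 0) ((2:Int) ^ p.2))) d)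
      d).keys = ls.foldl (fun ks s => PySem.Set.update ks (PySem.Set.ofList s)) d.keys := by
  induction ls generalizing k d with
  | nil => simp
  | cons a ls ih =>
    simp only [List.zipIdx_cons, List.foldl_cons]
    rw [ih (k+1)]
    congr 1
    exact PySem.Dict.keys_foldl_insert _ _ _

theorem nodup_keys_masks_gen (ls : List (List Int)) (k : Nat) (d : PySem.Dict Int Int)
    (hd : d.keys.Nodup) :
    ((ls.zipIdx k).foldl (fun d p =>
      (PySem.Set.ofList p.1).foldl (fun d x => d.insert x (PySem.Int.bor (d.getD x 0) ((2:Int) ^ p.2))) d)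
      d).keys.Nodup := by
  induction ls generalizing k d with
  | nil => simpa
  | cons a ls ih =>
    simp only [List.zipIdx_cons, List.foldl_cons]
    exact ih (k+1) _ (PySem.Dict.nodup_keys_foldl_insert _ _ _ hd)

theorem filter_keysfold_stop (p : Int → Bool) (ls : List (List Int)) (t : PySem.Set Int)
    (ht : ∀ x, p x = true → x ∈ t) :
    ((ls.foldl (fun ks s => PySem.Set.update ks (PySem.Set.ofList s)) t)).filter p = t.filter p := by
  induction ls generalizing t with
  | nil => rfl
  | cons a ls ih =>
    simp only [List.foldl_cons]
    rw [ih _ (fun x hx => (mem_update _ _ _).mpr (Or.inl (ht x hx)))]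
    rw [update_nodup _ (PySem.Set.nodup_ofList a) t, List.filter_append]
    have : ((PySem.Set.ofList a).filter (fun x => !(decide (x ∈ t)))).filter p = [] := by
      rw [List.filter_filter, List.filter_eq_nil_iff]
      intro x _ hx
      simp only [Bool.and_eq_true, Bool.not_eq_true', decide_eq_false_iff_not] at hx
      exact hx.2 (ht x hx.1)
    rw [this, List.append_nil]

theorem filter_keysfold (p : Int → Bool) : ∀ (ls : List (List Int)) (s : PySem.Set Int) (j : Nat),
    j < ls.length →
    (∀ x, p x = true → x ∉ s) →
    (∀ i, i < j → ∀ x, p x = true → x ∉ ls.getD i []) →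
    (∀ x, p x = true → x ∈ ls.getD j []) →
    ((ls.foldl (fun ks s => PySem.Set.update ks (PySem.Set.ofList s)) s)).filter p
      = (PySem.Set.ofList (ls.getD j [])).filter p := by
  intro ls
  induction ls with
  | nil => intro s j hj; simp at hj
  | cons a ls ih =>
    intro s j hj hs hlt hin
    simp only [List.foldl_cons]
    cases j with
    | zero =>
      have hin' : ∀ x, p x = true → x ∈ PySem.Set.update s (PySem.Set.ofList a) := by
        intro x hx
        exact (mem_update _ _ _).mpr (Or.inr ((PySem.Set.mem_ofList _ _).mpr (by simpa using hin x hx)))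
      rw [filter_keysfold_stop p ls _ hin']
      rw [update_nodup _ (PySem.Set.nodup_ofList a) s, List.filter_append]
      have h1 : s.filter p = [] := by
        rw [List.filter_eq_nil_iff]; intro x hxs hx; exact hs x hx hxs
      rw [h1, List.nil_append, List.filter_filter]
      apply List.filter_congr
      intro x _
      by_cases hx : p x = true
      · simp [hx, hs x hx]
      · simp only [Bool.not_eq_true] at hx; simp [hx]
    | succ j =>
      have hs' : ∀ x, p x = true → x ∉ PySem.Set.update s (PySem.Set.ofList a) := by
        intro x hx hmem
        rcases (mem_update _ _ _).mp hmem with h | h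
        · exact hs x hx h
        · exact hlt 0 (Nat.succ_pos _) x hx (by simpa using (PySem.Set.mem_ofList _ _).mp h)
      exact ih _ j (by simpa using Nat.lt_of_succ_lt_succ (by simpa using hj)) hs'
        (fun i hi x hx => hlt (i+1) (Nat.succ_lt_succ hi) x hx)
        (fun x hx => by simpa using hin x hx)

theorem foldl_inter_filter (ts : List (PySem.Set Int)) (h : PySem.Set Int) :
    ts.foldl PySem.Set.inter h = h.filter (fun x => ts.all (fun t => t.contains x)) := by
  induction ts generalizing h with
  | nil => simp
  | cons t ts ih =>
    simp only [List.foldl_cons, ih, PySem.Set.inter, List.filter_filter]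
    apply List.filter_congr
    intro x _
    simp [Bool.and_comm]

theorem foldl_diff_filter (ts : List (PySem.Set Int)) (h : PySem.Set Int) :
    ts.foldl PySem.Set.diff h = h.filter (fun x => ts.all (fun t => !t.contains x)) := by
  induction ts generalizing h with
  | nil => simp
  | cons t ts ih =>
    simp only [List.foldl_cons, ih, PySem.Set.diff, List.filter_filter]
    apply List.filter_congr
    intro x _
    simp [Bool.and_comm]

theorem list_eq_range_map (l : List (List Int)) :
    l.map (fun s => PySem.Set.ofList s) = (List.range l.length).map (fun i => PySem.Set.ofList (l.getD i [])) := by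
  apply List.ext_getElem
  · simp
  · intro i h1 h2
    simp only [List.getElem_map, List.getElem_range]
    congr 1
    simp only [List.length_map] at h1
    simp [List.getD, List.getElem?_eq_getElem h1]

theorem band_two_pow_testBit (b i : Nat) :
    (PySem.Int.band (b:Int) ((2:Int)^i) != 0) = b.testBit i := by
  have h : ((2:Int)^i) = ((2^i : Nat) : Int) := by push_cast; ring
  rw [h, PySem.Int.band_natCast]
  cases hbt : b.testBit i
  · simp [Nat.and_two_pow, hbt]
  · simp [Nat.and_two_pow, hbt]

theorem band_pos_testBit (b i : Nat) :
    (0 < PySem.Int.band (b:Int) ((2:Int)^i)) ↔ b.testBit i = true := by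
  have h : ((2:Int)^i) = ((2^i : Nat) : Int) := by push_cast; ring
  rw [h, PySem.Int.band_natCast]
  cases hbt : b.testBit i
  · simp [Nat.and_two_pow, hbt]
  · simp [Nat.and_two_pow, hbt]

theorem shift_band_testBit (b i : Nat) :
    (PySem.Int.band ((b:Int) >>> ((i:Nat):Int)) 1 != 0) = b.testBit i := by
  have h2 : (1:Int) = ((1:Nat):Int) := rfl
  rw [Int.shiftRight_natCast, h2, PySem.Int.band_natCast, Nat.and_one_is_mod,
    Nat.shiftRight_eq_div_pow, Nat.testBit_eq_decide_div_mod_eq]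
  rcases Nat.mod_two_eq_zero_or_one (b / 2^i) with h | h <;> simp [h]

theorem tag_char (b i : Nat) :
    PySem.Int.toStr (if 0 < PySem.Int.band (b:Int) ((2:Int)^i) then 1 else 0)
      = if (PySem.Int.band ((b:Int) >>> ((i:Nat):Int)) 1 != 0) = true then "1" else "0" := by
  rw [shift_band_testBit]
  by_cases hbt : b.testBit i = true
  · rw [if_pos ((band_pos_testBit b i).mpr hbt), if_pos hbt]
    rfl
  · rw [if_neg (fun h => hbt ((band_pos_testBit b i).mp h)), if_neg hbt]
    rfl

theorem beq_cast_decide (m b : Nat) : ((m:Int) == (b:Int)) = decide (m = b) := by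
  rw [Bool.eq_iff_iff]
  simp [beq_iff_eq]

theorem bitflags_eq (sets : List (List Int)) :
    (PySem.List.pyRange 0 (PySem.List.len sets)).map (fun k => (2:Int) ^ k.toNat)
      = (List.range sets.length).map (fun i => (2:Int) ^ i) := by
  rw [PySem.List.len_eq, PySem.List.pyRange_zero_nat, List.map_map]
  apply List.map_congr_left
  intro a _
  simp [Function.comp]

theorem per_bits_tag (sets : List (List Int)) (b : Nat) :
    PySem.Str.join "" (((PySem.List.pyRange 0 (PySem.List.len sets)).map (fun k => (2:Int) ^ k.toNat)).map
        (fun flag => PySem.Int.toStr (if 0 < PySem.Int.band (b : Int) flag then 1 else 0)))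
      = PySem.Str.join "" ((PySem.List.pyRange 0 (sets.length : Int)).map
        (fun i => if PySem.Int.band ((b : Int) >>> i) 1 != 0 then "1" else "0")) := by
  rw [bitflags_eq, PySem.List.pyRange_zero_nat, List.map_map, List.map_map]
  congr 1
  apply List.map_congr_left
  intro i _
  simp only [Function.comp]
  exact tag_char b i

theorem regionB_keys (sets : List (List Int)) (b : Nat) :
    ((((sets.zipIdx).foldl (fun d p =>
        (PySem.Set.ofList p.1).foldl (fun d x => d.insert x (PySem.Int.bor (d.getD x 0) ((2:Int) ^ p.2))) d)
        PySem.Dict.empty).items.foldl (fun d q => d.modify q.2 [] (fun l => l ++ [q.1])) PySem.Dict.empty).getD (b:Int) [])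
      = (sets.foldl (fun ks s => PySem.Set.update ks (PySem.Set.ofList s)) []).filter
          (fun k => decide (pvMaskN sets 0 k = b)) := by
  have hnd : (((sets.zipIdx).foldl (fun d p =>
      (PySem.Set.ofList p.1).foldl (fun d x => d.insert x (PySem.Int.bor (d.getD x 0) ((2:Int) ^ p.2))) d)
      PySem.Dict.empty)).keys.Nodup := nodup_keys_masks_gen sets 0 _ (by simp [PySem.Dict.empty])
  have h1 : (((sets.zipIdx).foldl (fun d p =>
      (PySem.Set.ofList p.1).foldl (fun d x => d.insert x (PySem.Int.bor (d.getD x 0) ((2:Int) ^ p.2))) d)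
      PySem.Dict.empty)).items.foldl (fun d q => d.modify q.2 [] (fun l => l ++ [q.1])) PySem.Dict.empty
      = ((((sets.zipIdx).foldl (fun d p =>
      (PySem.Set.ofList p.1).foldl (fun d x => d.insert x (PySem.Int.bor (d.getD x 0) ((2:Int) ^ p.2))) d)
      PySem.Dict.empty)).items.map Prod.swap).foldl (fun d q => d.modify q.1 [] (fun l => l ++ [q.2])) PySem.Dict.empty := by
    rw [List.foldl_map]
    rfl
  rw [h1, PySem.Dict.getD_foldl_modify_append, PySem.Dict.getD_empty, List.nil_append,
    List.filter_map, List.map_map]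
  rw [PySem.Dict.items_eq_map_keys _ hnd 0, List.filter_map, List.map_map]
  simp only [Function.comp_def, Prod.swap_prod_mk]
  rw [List.map_id']
  rw [keys_masks_gen sets 0 _]
  have h3 : (PySem.Dict.empty : PySem.Dict Int Int).keys = [] := rfl
  rw [h3]
  apply List.filter_congr
  intro k _
  have h4 : (((sets.zipIdx).foldl (fun d p =>
      (PySem.Set.ofList p.1).foldl (fun d x => d.insert x (PySem.Int.bor (d.getD x 0) ((2:Int) ^ p.2))) d)
      PySem.Dict.empty)).getD k 0 = ((pvMaskN sets 0 k : Nat) : Int) := by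
    have := getD_masks_gen k sets 0 PySem.Dict.empty 0 (by simp)
    simpa using this
  rw [h4]
  exact beq_cast_decide _ b


theorem includes_eq (sets : List (List Int)) (b : Nat) :
    ((List.zip ((PySem.List.pyRange 0 (PySem.List.len sets)).map (fun k => (2:Int) ^ k.toNat))
        (sets.map (fun s => PySem.Set.ofList s))).filter
          (fun p => PySem.Int.band (b:Int) p.1 != 0)).map (fun p => p.2)
      = ((List.range sets.length).filter (fun i => b.testBit i)).map
          (fun i => PySem.Set.ofList (sets.getD i [])) := by
  rw [bitflags_eq, list_eq_range_map, List.zip_map', List.filter_map, List.map_map]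
  simp only [Function.comp_def]
  rw [List.filter_congr (fun i _ => band_two_pow_testBit b i)]

theorem excludes_eq (sets : List (List Int)) (b : Nat) :
    ((List.zip ((PySem.List.pyRange 0 (PySem.List.len sets)).map (fun k => (2:Int) ^ k.toNat))
        (sets.map (fun s => PySem.Set.ofList s))).filter
          (fun p => !(PySem.Int.band (b:Int) p.1 != 0))).map (fun p => p.2)
      = ((List.range sets.length).filter (fun i => !b.testBit i)).map
          (fun i => PySem.Set.ofList (sets.getD i [])) := by
  rw [bitflags_eq, list_eq_range_map, List.zip_map', List.filter_map, List.map_map]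
  simp only [Function.comp_def]
  rw [List.filter_congr (fun i (_ : i ∈ List.range sets.length) =>
    (by rw [band_two_pow_testBit] : (!(PySem.Int.band (b:Int) ((2:Int)^i) != 0)) = !b.testBit i))]

theorem per_bits_region (sets : List (List Int)) (b : Nat) (hb0 : b ≠ 0) (hb : b < 2 ^ sets.length) :
    (((List.zip ((PySem.List.pyRange 0 (PySem.List.len sets)).map (fun k => (2:Int) ^ k.toNat))
        (sets.map (fun s => PySem.Set.ofList s))).filter
          (fun p => !(PySem.Int.band (b:Int) p.1 != 0))).map (fun p => p.2)).foldl PySem.Set.diff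
      ((((List.zip ((PySem.List.pyRange 0 (PySem.List.len sets)).map (fun k => (2:Int) ^ k.toNat))
        (sets.map (fun s => PySem.Set.ofList s))).filter
          (fun p => PySem.Int.band (b:Int) p.1 != 0)).map (fun p => p.2)).tail.foldl PySem.Set.inter
        ((((List.zip ((PySem.List.pyRange 0 (PySem.List.len sets)).map (fun k => (2:Int) ^ k.toNat))
        (sets.map (fun s => PySem.Set.ofList s))).filter
          (fun p => PySem.Int.band (b:Int) p.1 != 0)).map (fun p => p.2)).headD []))
      = PySem.Set.ofList
        ((((sets.zipIdx).foldl (fun d p =>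
            (PySem.Set.ofList p.1).foldl (fun d x => d.insert x (PySem.Int.bor (d.getD x 0) ((2:Int) ^ p.2))) d)
            PySem.Dict.empty).items.foldl (fun d q => d.modify q.2 [] (fun l => l ++ [q.1])) PySem.Dict.empty).getD (b:Int) []) := by
  -- the selected indices, in increasing order
  have hql : ((List.range sets.length).filter (fun i => b.testBit i)) ≠ [] := by
    intro hemp
    apply hb0
    apply Nat.eq_of_testBit_eq
    intro i
    rw [Nat.zero_testBit]
    by_cases hi : i < sets.length
    · by_contra hbit
      simp only [Bool.not_eq_false] at hbit
      have hmem : i ∈ (List.range sets.length).filter (fun i => b.testBit i) :=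
        List.mem_filter.mpr ⟨List.mem_range.mpr hi, hbit⟩
      rw [hemp] at hmem
      simp at hmem
    · exact Nat.testBit_eq_false_of_lt (lt_of_lt_of_le hb (Nat.pow_le_pow_right (by norm_num) (by omega)))
  obtain ⟨j, rest, hcons⟩ := List.exists_cons_of_ne_nil hql
  have hjmem : j ∈ (List.range sets.length).filter (fun i => b.testBit i) := by
    rw [hcons]; exact List.mem_cons_self
  have hjn : j < sets.length := List.mem_range.mp (List.mem_filter.mp hjmem).1
  have hjb : b.testBit j = true := (List.mem_filter.mp hjmem).2
  have hpw : ((List.range sets.length).filter (fun i => b.testBit i)).Pairwise (· < ·) :=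
    List.Pairwise.filter _ List.pairwise_lt_range
  rw [hcons] at hpw
  have hminrest : ∀ i ∈ rest, j < i := (List.pairwise_cons.mp hpw).1
  have hmin : ∀ i, i < sets.length → b.testBit i = true → j ≤ i := by
    intro i hi hbit
    have hmem : i ∈ j :: rest := by
      rw [← hcons]; exact List.mem_filter.mpr ⟨List.mem_range.mpr hi, hbit⟩
    rcases List.mem_cons.mp hmem with rfl | hr
    · exact le_refl _
    · exact le_of_lt (hminrest i hr)
  have hmaskiff : ∀ x, pvMaskN sets 0 x = b ↔
      ∀ i, i < sets.length → (x ∈ sets.getD i [] ↔ b.testBit i = true) := by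
    intro x; exact pvMaskN_eq_iff sets b x hb
  -- rewrite A's side
  rw [includes_eq sets b, excludes_eq sets b, hcons, List.map_cons, List.tail_cons, List.headD_cons]
  rw [foldl_inter_filter, foldl_diff_filter, List.filter_filter]
  -- rewrite B's side
  rw [regionB_keys sets b]
  rw [filter_keysfold (fun k => decide (pvMaskN sets 0 k = b)) sets [] j hjn
    (by simp)
    (by
      intro i hij x hpx hxi
      have hm := of_decide_eq_true hpx
      have hi : i < sets.length := lt_trans hij hjn
      have hbit := ((hmaskiff x).mp hm i hi).mp hxi
      have := hmin i hi hbit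
      omega)
    (by
      intro x hpx
      have hm := of_decide_eq_true hpx
      exact ((hmaskiff x).mp hm j hjn).mpr hjb)]
  rw [ofList_nodup_id _ (List.Nodup.filter _ (PySem.Set.nodup_ofList _))]
  simp only [List.all_map]
  apply List.filter_congr
  intro x hx
  have hxj : x ∈ sets.getD j [] := (PySem.Set.mem_ofList _ _).mp hx
  rw [Bool.eq_iff_iff]
  simp only [Bool.and_eq_true, List.all_eq_true, decide_eq_true_eq, Function.comp_def,
    Bool.not_eq_true']
  constructor
  · rintro ⟨hE, hI⟩
    rw [hmaskiff x]
    intro i hi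
    constructor
    · intro hxi
      by_contra hbit
      simp only [Bool.not_eq_true] at hbit
      have hiE : i ∈ (List.range sets.length).filter (fun i => !b.testBit i) :=
        List.mem_filter.mpr ⟨List.mem_range.mpr hi, by simp [hbit]⟩
      have h5 := hE i hiE
      simp [PySem.Set.mem_ofList] at h5
      exact h5 hxi
    · intro hbit
      have hmem : i ∈ j :: rest := by
        rw [← hcons]; exact List.mem_filter.mpr ⟨List.mem_range.mpr hi, hbit⟩
      rcases List.mem_cons.mp hmem with rfl | hr
      · exact hxj
      · have h5 := hI i hr
        simp [PySem.Set.mem_ofList] at h5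
        exact h5
  · intro hmask
    rw [hmaskiff x] at hmask
    constructor
    · intro i hiE
      rcases List.mem_filter.mp hiE with ⟨hir, hbit⟩
      have hi : i < sets.length := List.mem_range.mp hir
      simp [PySem.Set.mem_ofList]
      intro hxi
      have h6 := (hmask i hi).mp hxi
      simp [h6] at hbit
    · intro i hir
      have hmem : i ∈ (List.range sets.length).filter (fun i => b.testBit i) := by
        rw [hcons]; exact List.mem_cons_of_mem j hir
      rcases List.mem_filter.mp hmem with ⟨hirr, hbit⟩
      simp [PySem.Set.mem_ofList]
      exact (hmask i (List.mem_range.mp hirr)).mpr hbit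

-- ===== VERDICT (by name: the statement is the Claim_ definition above) =====
theorem get_set_intersections_spec : Claim_equal_get_set_intersections := by
  intro sets _
  unfold Spec_get_set_intersections
  show get_set_intersections sets = get_set_intersections_alt sets
  unfold get_set_intersections get_set_intersections_alt
  simp only [PySem.List.foldl_append_singleton_eq_map, List.nil_append]
  apply List.map_congr_left
  intro bits hbits
  rw [PySem.List.pyRange_neg_one] at hbits
  simp only [List.mem_map, List.mem_range] at hbits
  obtain ⟨k, hk, rfl⟩ := hbits
  have hc1 : (1:Int) ≤ 2 ^ sets.length := one_le_pow₀ (by norm_num)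
  have hcast : ((2:Int) ^ sets.length) = ((2 ^ sets.length : Nat) : Int) := by push_cast; ring
  have hbeq : ((2:Int) ^ sets.length - 1 - (k:Int))
      = ((((2:Int) ^ sets.length - 1 - (k:Int)).toNat : Nat) : Int) := by omega
  have hb0 : ((2:Int) ^ sets.length - 1 - (k:Int)).toNat ≠ 0 := by omega
  have hbn : ((2:Int) ^ sets.length - 1 - (k:Int)).toNat < 2 ^ sets.length := by omega
  rw [hbeq, Prod.mk.injEq]
  exact ⟨per_bits_tag sets _, per_bits_region sets _ hb0 hbn⟩
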